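-- pv_equiv track=rewrite | github.com/nwxio/OAssist | app/acl.py | _expand_with_descendants
-- ===== SOURCE A (Python) =====
-- from collections import defaultdict, deque
--
-- def _expand_with_descendants(selected_ids: set[str], children_map: dict[str, list[str]]) -> set[str]:
--     expanded: set[str] = set()
--     queue: deque[str] = deque(selected_ids)
--     while queue:
--         current = queue.popleft()
--         if current in expanded:
--             continue
--         expanded.add(current)
--         for child_id in children_map.get(current, []):
--             if child_id not in expanded:
--                 queue.append(child_id)
--     return expanded
-- ===== SOURCE B (Python) =====
-- def _expand_with_descendants(selected_ids: set[str], children_map: dict[str, list[str]]) -> set[str]: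
--     # Naive fixpoint iteration (datalog-style): repeatedly recompute the
--     # one-step children image of the WHOLE reached set until it stops growing.
--     # No queue, no frontier, no per-node worklist.
--     reached = dict.fromkeys(selected_ids)
--     while True:
--         bigger = dict(reached)
--         for node in reached:
--             for child in children_map.get(node, []):
--                 bigger.setdefault(child)
--         if len(bigger) == len(reached):
--             return set(reached)
--         reached = bigger
-- ===== Notes on version B (the rewrite author's own statement) =====
-- stated objective: alternative
-- what changed: Replaces the deque-worklist BFS by a naive fixpoint iteration: each round recomputes the one-step children image of the entire reached set (insertion-ordered dict) and stops when the set no longer grows, so there is no queue, no frontier and no per-node worklist at all.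
import Mathlib
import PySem

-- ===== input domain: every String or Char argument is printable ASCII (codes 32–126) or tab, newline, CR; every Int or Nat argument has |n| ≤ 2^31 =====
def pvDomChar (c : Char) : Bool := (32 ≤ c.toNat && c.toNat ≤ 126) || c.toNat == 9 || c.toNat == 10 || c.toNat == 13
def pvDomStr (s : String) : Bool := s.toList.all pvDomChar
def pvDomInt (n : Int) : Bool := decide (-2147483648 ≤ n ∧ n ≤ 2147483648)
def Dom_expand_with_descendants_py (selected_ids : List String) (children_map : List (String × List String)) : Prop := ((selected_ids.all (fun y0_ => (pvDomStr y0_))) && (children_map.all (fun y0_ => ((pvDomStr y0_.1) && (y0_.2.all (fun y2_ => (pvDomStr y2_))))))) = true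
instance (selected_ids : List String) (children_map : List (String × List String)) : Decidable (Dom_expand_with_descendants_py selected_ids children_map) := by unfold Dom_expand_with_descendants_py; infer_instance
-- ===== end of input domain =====

-- B replaces A's deque-worklist BFS by a naive fixpoint iteration (recompute the one-step image
-- of the whole reached set until it stops growing); objective: alternative algorithm, not speed.

-- children_map.get(node, []), shared helper of both ports
def pvKids (cm : List (String × List String)) (n : String) : List String :=
  PySem.Dict.getD (PySem.Dict.mk cm) n []

-- universe of ids that can ever be reached; bookkeeping for termination only
def pvU (selected_ids : List String) (cm : List (String × List String)) : List String :=
  selected_ids ++ cm.flatMap (fun p => p.2)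

def pvC (cm : List (String × List String)) : Nat := (cm.map (fun p => p.2.length)).sum

def pvMeasN (U : List String) (cm : List (String × List String)) (e : List String) : Nat :=
  (U.toFinset \ e.toFinset).card * (pvC cm + 1)

lemma pv_kids_sub (cm : List (String × List String)) (k : String) :
    ∀ c ∈ pvKids cm k, c ∈ cm.flatMap (fun p => p.2) := by
  intro c hc
  unfold pvKids PySem.Dict.getD PySem.Dict.get? at hc
  cases hfind : List.find? (fun p => p.1 == k) (PySem.Dict.mk cm).items with
  | none => rw [hfind] at hc; simp at hc
  | some p =>
    rw [hfind] at hc; simp at hc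
    have hp : p ∈ cm := List.mem_of_find?_eq_some hfind
    exact List.mem_flatMap.mpr ⟨p, hp, hc⟩

lemma pv_kids_len (cm : List (String × List String)) (k : String) :
    (pvKids cm k).length ≤ pvC cm := by
  unfold pvKids PySem.Dict.getD PySem.Dict.get?
  cases hfind : List.find? (fun p => p.1 == k) (PySem.Dict.mk cm).items with
  | none => simp
  | some p =>
    have hp : p ∈ cm := List.mem_of_find?_eq_some hfind
    simp only [Option.map_some, Option.getD_some]
    exact List.single_le_sum (fun x _ => Nat.zero_le x) _ (List.mem_map_of_mem hp)

-- A's inner 'if child not in expanded: queue.append(child)'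
def pvPush (e' : PySem.Set String) (q : List String) (c : String) : List String :=
  if PySem.Set.contains e' c then q else q ++ [c]

lemma pv_foldl_push (e' : PySem.Set String) (kids rest : List String) :
    kids.foldl (pvPush e') rest = rest ++ kids.filter (fun c => ! PySem.Set.contains e' c) := by
  rw [← PySem.List.foldl_append_if_eq_filter (fun c => ! PySem.Set.contains e' c) kids rest]
  apply PySem.List.foldl_congr_mem
  intro acc x _
  unfold pvPush
  cases h : PySem.Set.contains e' x <;> simp

lemma pv_measN_add (U : List String) (cm : List (String × List String))
    (e : PySem.Set String) (x : String) (hxU : x ∈ U)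
    (hxe : PySem.Set.contains e x = false) :
    pvMeasN U cm (PySem.Set.add e x) + (pvC cm + 1) ≤ pvMeasN U cm e := by
  have hxe' : x ∉ e := by
    intro h
    rw [(PySem.Set.contains_iff e x).mpr h] at hxe
    cases hxe
  have hadd : PySem.Set.add e x = e ++ [x] := by unfold PySem.Set.add; rw [hxe]; simp
  have hts : (PySem.Set.add e x).toFinset = insert x e.toFinset := by
    rw [hadd]; ext y; simp
  have hx' : x ∈ U.toFinset \ e.toFinset := by simp [hxU, hxe']
  have hcard : (U.toFinset \ (PySem.Set.add e x).toFinset).card < (U.toFinset \ e.toFinset).card := by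
    rw [hts, Finset.sdiff_insert]
    exact Finset.card_erase_lt_of_mem hx'
  unfold pvMeasN
  have h2 := Nat.mul_le_mul_right (pvC cm + 1) (Nat.succ_le_of_lt hcard)
  rw [Nat.succ_mul] at h2
  omega

-- ===== PORT A =====
-- A: FIFO worklist BFS; hU/hq are termination bookkeeping only (everything reachable lies in U)
def pvALoop (cm : List (String × List String)) (U : List String)
    (hU : ∀ c ∈ cm.flatMap (fun p => p.2), c ∈ U)
    (expanded : PySem.Set String) (queue : List String)
    (hq : ∀ x ∈ queue, x ∈ U) : List String :=
  match queue, hq with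
  | [], _ => expanded
  | current :: rest, hq =>
    if hc : PySem.Set.contains expanded current then
      pvALoop cm U hU expanded rest (fun x hx => hq x (List.mem_cons_of_mem _ hx))
    else
      let expanded' := PySem.Set.add expanded current
      pvALoop cm U hU expanded'
        ((pvKids cm current).foldl (pvPush expanded') rest)
        (by
          intro x hx
          rw [pv_foldl_push] at hx
          rcases List.mem_append.mp hx with hx | hx
          · exact hq x (List.mem_cons_of_mem _ hx)
          · exact hU x (pv_kids_sub cm current x (List.mem_of_mem_filter hx)))
  termination_by pvMeasN U cm expanded + queue.length
  decreasing_by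
  · simp
  · have h1 := pv_measN_add U cm expanded current (hq current List.mem_cons_self)
      (Bool.eq_false_iff.mpr hc)
    have h2 : ((pvKids cm current).filter
        (fun c => ! PySem.Set.contains (PySem.Set.add expanded current) c)).length ≤ pvC cm :=
      le_trans (List.length_filter_le _ _) (pv_kids_len cm current)
    rw [pv_foldl_push, List.length_append, List.length_cons]
    omega

def expand_with_descendants_py (selected_ids : List String) (children_map : List (String × List String)) : List String :=
  pvALoop children_map (pvU selected_ids children_map)
    (fun c hc => List.mem_append_right _ hc)
    PySem.Set.empty selected_ids
    (fun x hx => List.mem_append_left _ hx)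

-- ===== PORT B =====
-- one round of B: 'bigger = dict(reached); for node in reached: for child in kids: bigger.setdefault(child)'
def pvStep (cm : List (String × List String)) (reached : PySem.Set String) : PySem.Set String :=
  reached.foldl (fun out node => PySem.Set.update out (pvKids cm node)) reached

-- facts the loop's termination cites
lemma pv_prefix_stepfold (cm : List (String × List String)) :
    ∀ (l : List String) (s : PySem.Set String),
      s <+: l.foldl (fun out n => PySem.Set.update out (pvKids cm n)) s := by
  intro l
  induction l with
  | nil => intro s; simp
  | cons n rest ih =>
    intro s
    refine List.IsPrefix.trans ?_ (ih (PySem.Set.update s (pvKids cm n)))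
    rw [PySem.Set.update_eq_append_filter]
    exact List.prefix_append _ _

lemma pv_mem_stepfold (cm : List (String × List String)) :
    ∀ (l : List String) (s : PySem.Set String) (x : String),
      x ∈ l.foldl (fun out n => PySem.Set.update out (pvKids cm n)) s →
      x ∈ s ∨ x ∈ cm.flatMap (fun p => p.2) := by
  intro l
  induction l with
  | nil => intro s x hx; exact Or.inl hx
  | cons n rest ih =>
    intro s x hx
    rcases ih (PySem.Set.update s (pvKids cm n)) x hx with h | h
    · rcases (PySem.Set.mem_update _ _ _).mp h with h | h
      · exact Or.inl h
      · exact Or.inr (pv_kids_sub cm n x h)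
    · exact Or.inr h

lemma pv_nodup_stepfold (cm : List (String × List String)) :
    ∀ (l : List String) (s : PySem.Set String), s.Nodup →
      (l.foldl (fun out n => PySem.Set.update out (pvKids cm n)) s).Nodup := by
  intro l
  induction l with
  | nil => intro s h; exact h
  | cons n rest ih =>
    intro s h
    rw [List.foldl_cons]
    exact ih _ (PySem.Set.nodup_update _ _ h)

lemma pv_card_bound (U : List String) (s : PySem.Set String)
    (hnd : s.Nodup) (hsub : ∀ x ∈ s, x ∈ U) : s.length ≤ U.toFinset.card := by
  have h1 : s.toFinset.card = s.length := List.toFinset_card_of_nodup hnd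
  have h2 : s.toFinset ⊆ U.toFinset := by
    intro x hx
    exact List.mem_toFinset.mpr (hsub x (List.mem_toFinset.mp hx))
  have h3 := Finset.card_le_card h2
  omega

-- B's 'while True' loop; hU/hsub/hnd are termination bookkeeping only
def pvBLoop (cm : List (String × List String)) (U : List String)
    (hU : ∀ c ∈ cm.flatMap (fun p => p.2), c ∈ U)
    (reached : PySem.Set String)
    (hsub : ∀ x ∈ reached, x ∈ U) (hnd : reached.Nodup) : List String :=
  if heq : (pvStep cm reached).length = reached.length then reached
  else
    pvBLoop cm U hU (pvStep cm reached)
      (fun x hx => (pv_mem_stepfold cm reached reached x hx).elim (fun h => hsub x h) (fun h => hU x h))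
      (pv_nodup_stepfold cm reached reached hnd)
  termination_by U.toFinset.card - reached.length
  decreasing_by
    have h1 : reached.length ≤ (pvStep cm reached).length :=
      (pv_prefix_stepfold cm reached reached).length_le
    have h2 : (pvStep cm reached).length ≤ U.toFinset.card :=
      pv_card_bound U (pvStep cm reached) (pv_nodup_stepfold cm reached reached hnd)
        (fun x hx => (pv_mem_stepfold cm reached reached x hx).elim (fun h => hsub x h) (fun h => hU x h))
    omega

def expand_with_descendants_py_alt (selected_ids : List String) (children_map : List (String × List String)) : List String :=
  pvBLoop children_map (pvU selected_ids children_map)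
    (fun c hc => List.mem_append_right _ hc)
    (PySem.Set.ofList selected_ids)
    (fun x hx => List.mem_append_left _ ((PySem.Set.mem_ofList _ _).mp hx))
    (PySem.Set.nodup_ofList _)

-- ===== PRECONDITION & SPEC =====
def Spec_expand_with_descendants_py (selected_ids : List String) (children_map : List (String × List String)) (out : List String) : Prop := out = expand_with_descendants_py_alt selected_ids children_map
instance (selected_ids : List String) (children_map : List (String × List String)) (out : List String) : Decidable (Spec_expand_with_descendants_py selected_ids children_map out) := by unfold Spec_expand_with_descendants_py; infer_instance

-- ===== CLAIM (what is proved, stated in full; the proofs are below) =====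
def Claim_equal_expand_with_descendants_py : Prop := ∀ (selected_ids : List String) (children_map : List (String × List String)), Dom_expand_with_descendants_py selected_ids children_map → Spec_expand_with_descendants_py selected_ids children_map (expand_with_descendants_py selected_ids children_map)

-- ===== LEMMAS AND PROOFS =====

-- unfolding lemmas for A's loop
lemma pvALoop_nil (cm : List (String × List String)) (U : List String)
    (hU : ∀ c ∈ cm.flatMap (fun p => p.2), c ∈ U) (e : PySem.Set String)
    (h : ∀ x ∈ ([] : List String), x ∈ U) : pvALoop cm U hU e [] h = e := by
  rw [pvALoop.eq_def]

lemma pvALoop_skip (cm : List (String × List String)) (U : List String)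
    (hU : ∀ c ∈ cm.flatMap (fun p => p.2), c ∈ U) (e : PySem.Set String)
    (current : String) (rest : List String)
    (hc : PySem.Set.contains e current = true)
    (hq : ∀ x ∈ current :: rest, x ∈ U) (hq' : ∀ x ∈ rest, x ∈ U) :
    pvALoop cm U hU e (current :: rest) hq = pvALoop cm U hU e rest hq' := by
  rw [pvALoop.eq_def]
  dsimp only
  rw [dif_pos hc]

lemma pvALoop_expand (cm : List (String × List String)) (U : List String)
    (hU : ∀ c ∈ cm.flatMap (fun p => p.2), c ∈ U) (e : PySem.Set String)
    (current : String) (rest : List String)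
    (hc : PySem.Set.contains e current = false)
    (hq : ∀ x ∈ current :: rest, x ∈ U)
    (hq' : ∀ x ∈ (pvKids cm current).foldl
      (pvPush (PySem.Set.add e current)) rest, x ∈ U) :
    pvALoop cm U hU e (current :: rest) hq
      = pvALoop cm U hU (PySem.Set.add e current)
          ((pvKids cm current).foldl
            (pvPush (PySem.Set.add e current)) rest) hq' := by
  rw [pvALoop.eq_def]
  dsimp only
  rw [dif_neg (by rw [hc]; simp)]

-- level-BFS intermediate (proof-side only): one round expands a whole frontier
def pvBInner (cm : List (String × List String)) (expanded : PySem.Set String)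
    (frontier : List String) (acc : List String) : PySem.Set String × List String :=
  match frontier with
  | [] => (expanded, acc)
  | node :: rest =>
    if PySem.Set.contains expanded node then
      pvBInner cm expanded rest acc
    else
      let expanded' := PySem.Set.add expanded node
      pvBInner cm expanded' rest
        (acc ++ (pvKids cm node).filter
          (fun c => ! PySem.Set.contains expanded' c))

lemma pvBInner_skip (cm : List (String × List String)) (e : PySem.Set String)
    (node : String) (rest acc : List String) (h : PySem.Set.contains e node = true) :
    pvBInner cm e (node :: rest) acc = pvBInner cm e rest acc := by
  simp only [pvBInner]
  rw [if_pos h]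

lemma pvBInner_expand (cm : List (String × List String)) (e : PySem.Set String)
    (node : String) (rest acc : List String) (h : PySem.Set.contains e node = false) :
    pvBInner cm e (node :: rest) acc
      = pvBInner cm (PySem.Set.add e node) rest
          (acc ++ (pvKids cm node).filter
            (fun c => ! PySem.Set.contains (PySem.Set.add e node) c)) := by
  simp only [pvBInner]
  rw [if_neg (by rw [h]; simp)]

lemma pv_bInner_sub (cm : List (String × List String)) (U : List String)
    (hU : ∀ c ∈ cm.flatMap (fun p => p.2), c ∈ U) :
    ∀ (f : List String) (e : PySem.Set String) (acc : List String), (∀ x ∈ acc, x ∈ U) →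
      ∀ x ∈ (pvBInner cm e f acc).2, x ∈ U := by
  intro f
  induction f with
  | nil => intro e acc hacc x hx; exact hacc x (by simpa [pvBInner] using hx)
  | cons node rest ih =>
    intro e acc hacc x hx
    by_cases h : PySem.Set.contains e node = true
    · exact ih e acc hacc x (by rwa [pvBInner_skip cm e node rest acc h] at hx)
    · have h' : PySem.Set.contains e node = false := Bool.eq_false_iff.mpr h
      refine ih _ _ ?_ x (by rwa [pvBInner_expand cm e node rest acc h'] at hx)
      intro y hy
      rcases List.mem_append.mp hy with hy | hy
      · exact hacc y hy
      · exact hU y (pv_kids_sub cm node y (List.mem_of_mem_filter hy))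

lemma pv_bInner_le (cm : List (String × List String)) (U : List String) :
    ∀ (f : List String) (e : PySem.Set String) (acc : List String), (∀ x ∈ f, x ∈ U) →
      pvMeasN U cm (pvBInner cm e f acc).1 + (pvBInner cm e f acc).2.length
        ≤ pvMeasN U cm e + acc.length := by
  intro f
  induction f with
  | nil => intro e acc _; simp [pvBInner]
  | cons node rest ih =>
    intro e acc hf
    by_cases h : PySem.Set.contains e node = true
    · rw [pvBInner_skip cm e node rest acc h]
      exact ih e acc (fun x hx => hf x (List.mem_cons_of_mem _ hx))
    · have h' : PySem.Set.contains e node = false := Bool.eq_false_iff.mpr h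
      have h1 := pv_measN_add U cm e node (hf node List.mem_cons_self) h'
      have h2 : ((pvKids cm node).filter
          (fun c => ! PySem.Set.contains (PySem.Set.add e node) c)).length ≤ pvC cm :=
        le_trans (List.length_filter_le _ _) (pv_kids_len cm node)
      have h3 := ih (PySem.Set.add e node)
        (acc ++ (pvKids cm node).filter
          (fun c => ! PySem.Set.contains (PySem.Set.add e node) c))
        (fun x hx => hf x (List.mem_cons_of_mem _ hx))
      rw [List.length_append] at h3
      rw [pvBInner_expand cm e node rest acc h']
      omega

def pvBOuter (cm : List (String × List String)) (U : List String)
    (hU : ∀ c ∈ cm.flatMap (fun p => p.2), c ∈ U)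
    (expanded : PySem.Set String) (frontier : List String)
    (hf : ∀ x ∈ frontier, x ∈ U) : List String :=
  if hnil : frontier = [] then expanded
  else
    pvBOuter cm U hU (pvBInner cm expanded frontier []).1 (pvBInner cm expanded frontier []).2
      (pv_bInner_sub cm U hU frontier expanded [] (fun x hx => absurd hx (List.not_mem_nil)))
  termination_by pvMeasN U cm expanded + frontier.length
  decreasing_by
    have h := pv_bInner_le cm U frontier expanded [] hf
    have h1 : 1 ≤ frontier.length := by
      cases frontier with
      | nil => exact absurd rfl hnil
      | cons a l => simp
    simp only [List.length_nil] at h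
    omega

lemma pvBOuter_nil (cm : List (String × List String)) (U : List String)
    (hU : ∀ c ∈ cm.flatMap (fun p => p.2), c ∈ U) (e : PySem.Set String)
    (hf : ∀ x ∈ ([] : List String), x ∈ U) : pvBOuter cm U hU e [] hf = e := by
  rw [pvBOuter.eq_def]
  rw [dif_pos rfl]

lemma pvBOuter_cons (cm : List (String × List String)) (U : List String)
    (hU : ∀ c ∈ cm.flatMap (fun p => p.2), c ∈ U) (e : PySem.Set String)
    (frontier : List String) (hne : frontier ≠ [])
    (hf : ∀ x ∈ frontier, x ∈ U)
    (h' : ∀ x ∈ (pvBInner cm e frontier []).2, x ∈ U) :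
    pvBOuter cm U hU e frontier hf
      = pvBOuter cm U hU (pvBInner cm e frontier []).1 (pvBInner cm e frontier []).2 h' := by
  rw [pvBOuter.eq_def]
  rw [dif_neg hne]

-- One frontier pass equals running A's queue down to the collected next frontier.
lemma pv_L (cm : List (String × List String)) (U : List String)
    (hU : ∀ c ∈ cm.flatMap (fun p => p.2), c ∈ U) :
    ∀ (f q nxt : List String) (e : PySem.Set String)
      (p : PySem.Set String × List String) (heq : q = f ++ nxt)
      (hp : p = pvBInner cm e f nxt)
      (h1 : ∀ x ∈ q, x ∈ U) (h2 : ∀ x ∈ p.2, x ∈ U),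
      pvALoop cm U hU e q h1 = pvALoop cm U hU p.1 p.2 h2 := by
  intro f
  induction f with
  | nil =>
    intro q nxt e p heq hp h1 h2
    subst heq; subst hp
    rfl
  | cons node rest ih =>
    intro q nxt e p heq hp h1 h2
    subst heq
    by_cases hc : PySem.Set.contains e node = true
    · exact (pvALoop_skip cm U hU e node (rest ++ nxt) hc h1
        (fun x hx => h1 x (List.mem_cons_of_mem _ hx))).trans
        (ih (rest ++ nxt) nxt e p rfl (hp.trans (pvBInner_skip cm e node rest nxt hc)) _ h2)
    · have hc' : PySem.Set.contains e node = false := Bool.eq_false_iff.mpr hc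
      exact (pvALoop_expand cm U hU e node (rest ++ nxt) hc' h1
        (by
          intro x hx
          rw [pv_foldl_push] at hx
          rcases List.mem_append.mp hx with hx | hx
          · exact h1 x (List.mem_cons_of_mem _ hx)
          · exact hU x (pv_kids_sub cm node x (List.mem_of_mem_filter hx)))).trans
        (ih _ (nxt ++ (pvKids cm node).filter
            (fun c => ! PySem.Set.contains (PySem.Set.add e node) c))
          (PySem.Set.add e node) p
          (by rw [pv_foldl_push, List.append_assoc])
          (hp.trans (pvBInner_expand cm e node rest nxt hc')) _ h2)

-- A's worklist BFS equals the level-BFS intermediate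
lemma pv_main (cm : List (String × List String)) (U : List String)
    (hU : ∀ c ∈ cm.flatMap (fun p => p.2), c ∈ U) :
    ∀ (n : Nat) (e : PySem.Set String) (f : List String) (hf : ∀ x ∈ f, x ∈ U),
      pvMeasN U cm e + f.length ≤ n →
      pvALoop cm U hU e f hf = pvBOuter cm U hU e f hf := by
  intro n
  induction n with
  | zero =>
    intro e f hf hle
    cases f with
    | nil => rw [pvALoop_nil, pvBOuter_nil]
    | cons a l => simp at hle
  | succ n ih =>
    intro e f hf hle
    cases f with
    | nil => rw [pvALoop_nil, pvBOuter_nil]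
    | cons node rest =>
      have h2 := pv_bInner_sub cm U hU (node :: rest) e []
        (fun x hx => absurd hx (List.not_mem_nil))
      have hle2 := pv_bInner_le cm U (node :: rest) e [] hf
      rw [pv_L cm U hU (node :: rest) (node :: rest) [] e
        (pvBInner cm e (node :: rest) []) (List.append_nil _).symm rfl hf h2]
      rw [ih _ _ h2 (by simp only [List.length_nil] at hle2; simp at hle ⊢; omega)]
      exact (pvBOuter_cons cm U hU e (node :: rest) (List.cons_ne_nil node rest) hf h2).symm

-- ===== bridge between the level-BFS intermediate and B's fixpoint loop =====

-- the new nodes and the collected children of one pvBInner round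
def pvNew (cm : List (String × List String)) : PySem.Set String → List String → List String × List String
  | _, [] => ([], [])
  | s, n :: rest =>
    if PySem.Set.contains s n then pvNew cm s rest
    else
      let p := pvNew cm (PySem.Set.add s n) rest
      (n :: p.1, (pvKids cm n).filter (fun c => ! PySem.Set.contains (PySem.Set.add s n) c) ++ p.2)

lemma pvNew_skip (cm : List (String × List String)) (s : PySem.Set String)
    (n : String) (rest : List String) (h : PySem.Set.contains s n = true) :
    pvNew cm s (n :: rest) = pvNew cm s rest := by
  simp only [pvNew]
  rw [if_pos h]

lemma pvNew_ex (cm : List (String × List String)) (s : PySem.Set String)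
    (n : String) (rest : List String) (h : PySem.Set.contains s n = false) :
    pvNew cm s (n :: rest)
      = (n :: (pvNew cm (PySem.Set.add s n) rest).1,
         (pvKids cm n).filter (fun c => ! PySem.Set.contains (PySem.Set.add s n) c)
           ++ (pvNew cm (PySem.Set.add s n) rest).2) := by
  simp only [pvNew]
  rw [if_neg (by rw [h]; simp)]

lemma pv_add_eq_append (s : PySem.Set String) (n : String)
    (h : PySem.Set.contains s n = false) : PySem.Set.add s n = s ++ [n] := by
  unfold PySem.Set.add
  rw [h]
  simp

lemma pv_decomp (cm : List (String × List String)) :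
    ∀ (f : List String) (s : PySem.Set String) (acc : List String),
      pvBInner cm s f acc = (s ++ (pvNew cm s f).1, acc ++ (pvNew cm s f).2) := by
  intro f
  induction f with
  | nil => intro s acc; simp [pvBInner, pvNew]
  | cons n rest ih =>
    intro s acc
    by_cases h : PySem.Set.contains s n = true
    · rw [pvBInner_skip cm s n rest acc h, pvNew_skip cm s n rest h]
      exact ih s acc
    · have h' : PySem.Set.contains s n = false := Bool.eq_false_iff.mpr h
      rw [pvBInner_expand cm s n rest acc h', pvNew_ex cm s n rest h', ih]
      rw [pv_add_eq_append s n h']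
      simp

lemma pv_equpd (cm : List (String × List String)) :
    ∀ (f : List String) (s : PySem.Set String),
      s ++ (pvNew cm s f).1 = PySem.Set.update s f := by
  intro f
  induction f with
  | nil => intro s; simp [pvNew, PySem.Set.update]
  | cons n rest ih =>
    intro s
    rw [PySem.Set.update_cons]
    by_cases h : PySem.Set.contains s n = true
    · rw [pvNew_skip cm s n rest h]
      rw [PySem.Set.add_of_mem ((PySem.Set.contains_iff s n).mp h)]
      exact ih s
    · have h' : PySem.Set.contains s n = false := Bool.eq_false_iff.mpr h
      rw [pvNew_ex cm s n rest h']
      have := ih (PySem.Set.add s n)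
      rw [pv_add_eq_append s n h'] at this ⊢
      rw [← this]
      simp

-- children of newly expanded nodes land in the expanded set or the collected next frontier
lemma pv_imgnew (cm : List (String × List String)) :
    ∀ (f : List String) (s : PySem.Set String),
      ∀ n ∈ (pvNew cm s f).1, ∀ c ∈ pvKids cm n,
        c ∈ PySem.Set.update s f ∨ c ∈ (pvNew cm s f).2 := by
  intro f
  induction f with
  | nil => intro s n hn; simp [pvNew] at hn
  | cons m rest ih =>
    intro s n hn c hc
    by_cases h : PySem.Set.contains s m = true
    · rw [pvNew_skip cm s m rest h] at hn ⊢
      rcases ih s n hn c hc with hin | hin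
      · left
        rcases (PySem.Set.mem_update _ _ _).mp hin with h1 | h1
        · exact (PySem.Set.mem_update _ _ _).mpr (Or.inl h1)
        · exact (PySem.Set.mem_update _ _ _).mpr (Or.inr (List.mem_cons_of_mem _ h1))
      · right; exact hin
    · have h' : PySem.Set.contains s m = false := Bool.eq_false_iff.mpr h
      rw [pvNew_ex cm s m rest h'] at hn ⊢
      rcases List.mem_cons.mp hn with rfl | hn
      · by_cases hcc : PySem.Set.contains (PySem.Set.add s n) c = true
        · left
          have : c ∈ PySem.Set.add s n := (PySem.Set.contains_iff _ _).mp hcc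
          rw [pv_add_eq_append s n h'] at this
          rcases List.mem_append.mp this with h1 | h1
          · exact (PySem.Set.mem_update _ _ _).mpr (Or.inl h1)
          · simp at h1
            exact (PySem.Set.mem_update _ _ _).mpr (Or.inr (by simp [h1]))
        · right
          apply List.mem_append_left
          have hf0 : PySem.Set.contains (PySem.Set.add s n) c = false := Bool.eq_false_iff.mpr hcc
          exact List.mem_filter.mpr ⟨hc, by rw [hf0]; rfl⟩
      · rcases ih (PySem.Set.add s m) n hn c hc with hin | hin
        · left
          rcases (PySem.Set.mem_update _ _ _).mp hin with h1 | h1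
          · rw [pv_add_eq_append s m h'] at h1
            rcases List.mem_append.mp h1 with h2 | h2
            · exact (PySem.Set.mem_update _ _ _).mpr (Or.inl h2)
            · simp at h2
              exact (PySem.Set.mem_update _ _ _).mpr (Or.inr (by simp [h2]))
          · exact (PySem.Set.mem_update _ _ _).mpr (Or.inr (List.mem_cons_of_mem _ h1))
        · right; exact List.mem_append_right _ hin

-- updating by a filtered list is updating by the list when the removed elements are present
lemma pv_upd_filter :
    ∀ (l : List String) (t : PySem.Set String) (p : String → Bool),
      (∀ x ∈ l, p x = false → x ∈ t) →
      PySem.Set.update t (l.filter p) = PySem.Set.update t l := by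
  intro l
  induction l with
  | nil => intro t p _; rfl
  | cons x xs ih =>
    intro t p h
    by_cases hp : p x = true
    · rw [List.filter_cons_of_pos hp, PySem.Set.update_cons, PySem.Set.update_cons]
      exact ih (PySem.Set.add t x) p
        (fun y hy hpy => (PySem.Set.mem_add _ _ _).mpr (Or.inl (h y (List.mem_cons_of_mem _ hy) hpy)))
    · have hp' : p x = false := Bool.eq_false_iff.mpr hp
      rw [List.filter_cons_of_neg (by simp [hp']), PySem.Set.update_cons,
        PySem.Set.add_of_mem (h x List.mem_cons_self hp')]
      exact ih t p (fun y hy hpy => h y (List.mem_cons_of_mem _ hy) hpy)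

lemma pv_upd_noop :
    ∀ (l : List String) (t : PySem.Set String), (∀ x ∈ l, x ∈ t) →
      PySem.Set.update t l = t := by
  intro l
  induction l with
  | nil => intro t _; rfl
  | cons x xs ih =>
    intro t h
    rw [PySem.Set.update_cons, PySem.Set.add_of_mem (h x List.mem_cons_self)]
    exact ih t (fun y hy => h y (List.mem_cons_of_mem _ hy))

lemma pv_fold_noop (cm : List (String × List String)) :
    ∀ (l : List String) (t : PySem.Set String),
      (∀ n ∈ l, ∀ c ∈ pvKids cm n, c ∈ t) →
      l.foldl (fun out n => PySem.Set.update out (pvKids cm n)) t = t := by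
  intro l
  induction l with
  | nil => intro t _; rfl
  | cons n rest ih =>
    intro t h
    rw [List.foldl_cons, pv_upd_noop _ t (h n List.mem_cons_self)]
    exact ih t (fun m hm => h m (List.mem_cons_of_mem _ hm))

-- folding the children image over the new nodes equals one update by the collected children
lemma pv_k (cm : List (String × List String)) :
    ∀ (f : List String) (s t : PySem.Set String),
      (∀ x ∈ s, x ∈ t) → (∀ x ∈ f, x ∈ t) →
      (pvNew cm s f).1.foldl (fun out n => PySem.Set.update out (pvKids cm n)) t
        = PySem.Set.update t (pvNew cm s f).2 := by
  intro f
  induction f with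
  | nil => intro s t _ _; simp [pvNew]
  | cons n rest ih =>
    intro s t hs hf
    by_cases h : PySem.Set.contains s n = true
    · rw [pvNew_skip cm s n rest h]
      exact ih s t hs (fun x hx => hf x (List.mem_cons_of_mem _ hx))
    · have h' : PySem.Set.contains s n = false := Bool.eq_false_iff.mpr h
      rw [pvNew_ex cm s n rest h']
      rw [List.foldl_cons]
      rw [PySem.Set.update_append]
      have hfilt : PySem.Set.update t
          ((pvKids cm n).filter (fun c => ! PySem.Set.contains (PySem.Set.add s n) c))
          = PySem.Set.update t (pvKids cm n) := by
        apply pv_upd_filter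
        intro c _ hcp
        have hcc : PySem.Set.contains (PySem.Set.add s n) c = true := by
          cases hcase : PySem.Set.contains (PySem.Set.add s n) c with
          | true => rfl
          | false => rw [hcase] at hcp; simp at hcp
        have : c ∈ PySem.Set.add s n := (PySem.Set.contains_iff _ _).mp hcc
        rw [pv_add_eq_append s n h'] at this
        rcases List.mem_append.mp this with h1 | h1
        · exact hs c h1
        · simp at h1; subst h1; exact hf c List.mem_cons_self
      rw [hfilt]
      apply ih (PySem.Set.add s n) (PySem.Set.update t (pvKids cm n))
      · intro x hx
        rcases (PySem.Set.mem_add _ _ _).mp hx with h1 | h1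
        · exact (PySem.Set.mem_update _ _ _).mpr (Or.inl (hs x h1))
        · subst h1; exact (PySem.Set.mem_update _ _ _).mpr (Or.inl (hf x List.mem_cons_self))
      · intro x hx
        exact (PySem.Set.mem_update _ _ _).mpr (Or.inl (hf x (List.mem_cons_of_mem _ hx)))

-- KEY: one pvStep on the expanded set equals one update by the collected frontier
lemma pv_key (cm : List (String × List String)) (f : List String) (e : PySem.Set String)
    (himg : ∀ m ∈ e, ∀ c ∈ pvKids cm m, c ∈ e ∨ c ∈ f) :
    pvStep cm (PySem.Set.update e f)
      = PySem.Set.update (PySem.Set.update e f) (pvNew cm e f).2 := by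
  unfold pvStep
  have hsplit : PySem.Set.update e f = e ++ (pvNew cm e f).1 := (pv_equpd cm f e).symm
  rw [show (PySem.Set.update e f).foldl (fun out n => PySem.Set.update out (pvKids cm n)) (PySem.Set.update e f)
      = (e ++ (pvNew cm e f).1).foldl (fun out n => PySem.Set.update out (pvKids cm n)) (PySem.Set.update e f) by rw [← hsplit]]
  rw [List.foldl_append]
  rw [pv_fold_noop cm e (PySem.Set.update e f) (by
    intro n hn c hc
    rcases himg n hn c hc with h | h
    · exact (PySem.Set.mem_update _ _ _).mpr (Or.inl h)
    · exact (PySem.Set.mem_update _ _ _).mpr (Or.inr h))]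
  exact pv_k cm f e (PySem.Set.update e f)
    (fun x hx => (PySem.Set.mem_update _ _ _).mpr (Or.inl hx))
    (fun x hx => (PySem.Set.mem_update _ _ _).mpr (Or.inr hx))

lemma pvBOuter_congr (cm : List (String × List String)) (U : List String)
    (hU : ∀ c ∈ cm.flatMap (fun p => p.2), c ∈ U)
    (e1 e2 : PySem.Set String) (f1 f2 : List String)
    (he : e1 = e2) (hff : f1 = f2)
    (h1 : ∀ x ∈ f1, x ∈ U) (h2 : ∀ x ∈ f2, x ∈ U) :
    pvBOuter cm U hU e1 f1 h1 = pvBOuter cm U hU e2 f2 h2 := by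
  subst he; subst hff; rfl

-- unfolding / congruence lemmas for B's loop
lemma pvBLoop_congr (cm : List (String × List String)) (U : List String)
    (hU : ∀ c ∈ cm.flatMap (fun p => p.2), c ∈ U)
    (r1 r2 : PySem.Set String) (h : r1 = r2)
    (hs1 : ∀ x ∈ r1, x ∈ U) (hn1 : r1.Nodup)
    (hs2 : ∀ x ∈ r2, x ∈ U) (hn2 : r2.Nodup) :
    pvBLoop cm U hU r1 hs1 hn1 = pvBLoop cm U hU r2 hs2 hn2 := by
  subst h; rfl

lemma pvBLoop_stop (cm : List (String × List String)) (U : List String)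
    (hU : ∀ c ∈ cm.flatMap (fun p => p.2), c ∈ U)
    (r : PySem.Set String) (hs : ∀ x ∈ r, x ∈ U) (hn : r.Nodup)
    (h : (pvStep cm r).length = r.length) :
    pvBLoop cm U hU r hs hn = r := by
  rw [pvBLoop.eq_def]
  rw [dif_pos h]

lemma pvBLoop_go (cm : List (String × List String)) (U : List String)
    (hU : ∀ c ∈ cm.flatMap (fun p => p.2), c ∈ U)
    (r : PySem.Set String) (hs : ∀ x ∈ r, x ∈ U) (hn : r.Nodup)
    (h : (pvStep cm r).length ≠ r.length)
    (hs' : ∀ x ∈ pvStep cm r, x ∈ U) (hn' : (pvStep cm r).Nodup) :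
    pvBLoop cm U hU r hs hn = pvBLoop cm U hU (pvStep cm r) hs' hn' := by
  rw [pvBLoop.eq_def]
  rw [dif_neg h]

lemma pv_step_eq_of_len (cm : List (String × List String)) (r : PySem.Set String)
    (h : (pvStep cm r).length = r.length) : pvStep cm r = r := by
  exact ((pv_prefix_stepfold cm r r).eq_of_length h.symm).symm

lemma pvBLoop_step (cm : List (String × List String)) (U : List String)
    (hU : ∀ c ∈ cm.flatMap (fun p => p.2), c ∈ U)
    (r : PySem.Set String) (hs : ∀ x ∈ r, x ∈ U) (hn : r.Nodup)
    (hs' : ∀ x ∈ pvStep cm r, x ∈ U) (hn' : (pvStep cm r).Nodup) :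
    pvBLoop cm U hU r hs hn = pvBLoop cm U hU (pvStep cm r) hs' hn' := by
  by_cases h : (pvStep cm r).length = r.length
  · exact pvBLoop_congr cm U hU r (pvStep cm r) (pv_step_eq_of_len cm r h).symm hs hn hs' hn'
  · exact pvBLoop_go cm U hU r hs hn h hs' hn'

-- MAIN BRIDGE: the level-BFS intermediate equals B's fixpoint loop
lemma pv_main2 (cm : List (String × List String)) (U : List String)
    (hU : ∀ c ∈ cm.flatMap (fun p => p.2), c ∈ U) :
    ∀ (n : Nat) (e : PySem.Set String) (f : List String)
      (hf : ∀ x ∈ f, x ∈ U) (he : ∀ x ∈ e, x ∈ U) (hnd : e.Nodup)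
      (himg : ∀ m ∈ e, ∀ c ∈ pvKids cm m, c ∈ e ∨ c ∈ f),
      pvMeasN U cm e + f.length ≤ n →
      ∀ (hs' : ∀ x ∈ PySem.Set.update e f, x ∈ U) (hn' : (PySem.Set.update e f).Nodup),
        pvBOuter cm U hU e f hf = pvBLoop cm U hU (PySem.Set.update e f) hs' hn' := by
  intro n
  induction n with
  | zero =>
    intro e f hf he hnd himg hle hs' hn'
    cases f with
    | nil =>
      rw [pvBOuter_nil]
      have hupd : PySem.Set.update e ([] : List String) = e := pv_upd_noop [] e (by simp)
      rw [pvBLoop_congr cm U hU _ e hupd hs' hn' he hnd]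
      have hse : pvStep cm e = e := by
        unfold pvStep
        exact pv_fold_noop cm e e (fun m hm c hc => (himg m hm c hc).elim id (by simp))
      exact (pvBLoop_stop cm U hU e he hnd (by rw [hse])).symm
    | cons a l => simp at hle
  | succ n ih =>
    intro e f hf he hnd himg hle hs' hn'
    cases f with
    | nil =>
      rw [pvBOuter_nil]
      have hupd : PySem.Set.update e ([] : List String) = e := pv_upd_noop [] e (by simp)
      rw [pvBLoop_congr cm U hU _ e hupd hs' hn' he hnd]
      have hse : pvStep cm e = e := by
        unfold pvStep
        exact pv_fold_noop cm e e (fun m hm c hc => (himg m hm c hc).elim id (by simp))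
      exact (pvBLoop_stop cm U hU e he hnd (by rw [hse])).symm
    | cons node rest =>
      have hsubB := pv_bInner_sub cm U hU (node :: rest) e []
        (fun x hx => absurd hx (List.not_mem_nil))
      rw [pvBOuter_cons cm U hU e (node :: rest) (List.cons_ne_nil node rest) hf hsubB]
      have hdec := pv_decomp cm (node :: rest) e []
      have hB1 : (pvBInner cm e (node :: rest) []).1 = PySem.Set.update e (node :: rest) := by
        rw [hdec]; exact pv_equpd cm (node :: rest) e
      have hB2 : (pvBInner cm e (node :: rest) []).2 = (pvNew cm e (node :: rest)).2 := by
        rw [hdec]; simp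
      -- facts about the new state
      have hk2 : ∀ x ∈ (pvNew cm e (node :: rest)).2, x ∈ U := by
        intro x hx; exact hsubB x (by rw [hB2]; exact hx)
      have he' : ∀ x ∈ PySem.Set.update e (node :: rest), x ∈ U := by
        intro x hx
        rcases (PySem.Set.mem_update _ _ _).mp hx with h | h
        · exact he x h
        · exact hf x h
      have hnd' : (PySem.Set.update e (node :: rest)).Nodup := PySem.Set.nodup_update _ _ hnd
      have himg' : ∀ m ∈ PySem.Set.update e (node :: rest), ∀ c ∈ pvKids cm m,
          c ∈ PySem.Set.update e (node :: rest) ∨ c ∈ (pvNew cm e (node :: rest)).2 := by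
        intro m hm c hc
        rw [← pv_equpd cm (node :: rest) e] at hm
        rcases List.mem_append.mp hm with hm | hm
        · rcases himg m hm c hc with h | h
          · exact Or.inl ((PySem.Set.mem_update _ _ _).mpr (Or.inl h))
          · exact Or.inl ((PySem.Set.mem_update _ _ _).mpr (Or.inr h))
        · exact pv_imgnew cm (node :: rest) e m hm c hc
      -- measure
      have hle2 := pv_bInner_le cm U (node :: rest) e [] hf
      rw [hdec] at hle2
      simp only [List.nil_append, List.length_nil, List.length_append] at hle2
      rw [pv_equpd cm (node :: rest) e] at hle2
      have hle3 : pvMeasN U cm (PySem.Set.update e (node :: rest))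
          + (pvNew cm e (node :: rest)).2.length ≤ n := by
        simp at hle
        omega
      -- rewrite the outer call through the decomposition, then apply the IH
      have hstep := pv_key cm (node :: rest) e himg
      have hrec := ih (PySem.Set.update e (node :: rest)) (pvNew cm e (node :: rest)).2
        hk2 he' hnd' himg' hle3
        (by
          intro x hx
          rcases (PySem.Set.mem_update _ _ _).mp hx with h | h
          · exact he' x h
          · exact hk2 x h)
        (PySem.Set.nodup_update _ _ hnd')
      have houter : pvBOuter cm U hU (pvBInner cm e (node :: rest) []).1
          (pvBInner cm e (node :: rest) []).2
          (pv_bInner_sub cm U hU (node :: rest) e [] (fun x hx => absurd hx (List.not_mem_nil)))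
          = pvBOuter cm U hU (PySem.Set.update e (node :: rest)) (pvNew cm e (node :: rest)).2 hk2 :=
        pvBOuter_congr cm U hU _ _ _ _ hB1 hB2 _ _
      have hsS : ∀ x ∈ pvStep cm (PySem.Set.update e (node :: rest)), x ∈ U := by
        rw [hstep]
        intro x hx
        rcases (PySem.Set.mem_update _ _ _).mp hx with h | h
        · exact he' x h
        · exact hk2 x h
      have hnS : (pvStep cm (PySem.Set.update e (node :: rest))).Nodup := by
        rw [hstep]
        exact PySem.Set.nodup_update _ _ hnd'
      rw [houter, hrec]
      refine Eq.symm ?_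
      rw [pvBLoop_step cm U hU (PySem.Set.update e (node :: rest)) hs' hn' hsS hnS]
      exact pvBLoop_congr cm U hU _ _ hstep hsS hnS _ _

-- ===== VERDICT (by name: the statement is the Claim_ definition above) =====
theorem expand_with_descendants_py_spec : Claim_equal_expand_with_descendants_py := by
  intro selected_ids children_map _
  unfold Spec_expand_with_descendants_py expand_with_descendants_py expand_with_descendants_py_alt
  have hU : ∀ c ∈ children_map.flatMap (fun p => p.2), c ∈ pvU selected_ids children_map :=
    fun c hc => List.mem_append_right _ hc
  have hs' : ∀ x ∈ PySem.Set.update PySem.Set.empty selected_ids, x ∈ pvU selected_ids children_map := by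
    intro x hx
    rcases (PySem.Set.mem_update _ _ _).mp hx with h | h
    · exact absurd h (List.not_mem_nil)
    · exact List.mem_append_left _ h
  have hn' : (PySem.Set.update PySem.Set.empty selected_ids).Nodup :=
    PySem.Set.nodup_update _ _ List.nodup_nil
  rw [pv_main children_map (pvU selected_ids children_map) hU
    (pvMeasN (pvU selected_ids children_map) children_map PySem.Set.empty + selected_ids.length)
    PySem.Set.empty selected_ids (fun x hx => List.mem_append_left _ hx) le_rfl]
  rw [pv_main2 children_map (pvU selected_ids children_map) hU
    (pvMeasN (pvU selected_ids children_map) children_map PySem.Set.empty + selected_ids.length)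
    PySem.Set.empty selected_ids (fun x hx => List.mem_append_left _ hx)
    (fun x hx => absurd hx (List.not_mem_nil)) List.nodup_nil
    (fun m hm => absurd hm (List.not_mem_nil)) le_rfl hs' hn']
  exact pvBLoop_congr children_map (pvU selected_ids children_map) hU _ _
    (PySem.Set.update_nil_left selected_ids) hs' hn' _ _
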